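-- pv_equiv track=rewrite | github.com/Jinwooooo/algorithm-archive | BOJ/lazyBear_10025.py | solve_lazy_bear
-- ===== SOURCE A (Python) =====
-- def solve_lazy_bear(max_reach, arr_ice, max_idx):
-- 	lp = 1
-- 	rp = lp + max_reach * 2
-- 	if rp >= max_idx:
-- 		return sum(arr_ice)
-- 	curr_ice = sum(arr_ice[lp:rp+1])
-- 	max_ice = curr_ice
--
-- 	while rp < max_idx:
-- 		lp += 1
-- 		rp += 1
--
-- 		curr_ice = curr_ice - arr_ice[lp-1] + arr_ice[rp]
-- 		max_ice = max(max_ice, curr_ice)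
--
-- 	return max_ice
-- ===== SOURCE B (Python) =====
-- def solve_lazy_bear(max_reach, arr_ice, max_idx):
--     if 1 + 2 * max_reach >= max_idx:
--         return sum(arr_ice)
--     P = [0]
--     for x in arr_ice:
--         P.append(P[-1] + x)
--     return max(P[l + 2 * max_reach + 1] - P[l]
--                for l in range(1, max_idx - 2 * max_reach + 1))
-- ===== Notes on version B (the rewrite author's own statement) =====
-- stated objective: alternative
-- what changed: Replaces A's incremental add/subtract sliding-window loop with a prefix-sum table and a max over the window differences P[l+2k+1]-P[l].
-- outside the precondition, e.g. on solve_lazy_bear(-1, [1, 2, 3], 1): A returns 0, B returns -1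
import Mathlib
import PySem

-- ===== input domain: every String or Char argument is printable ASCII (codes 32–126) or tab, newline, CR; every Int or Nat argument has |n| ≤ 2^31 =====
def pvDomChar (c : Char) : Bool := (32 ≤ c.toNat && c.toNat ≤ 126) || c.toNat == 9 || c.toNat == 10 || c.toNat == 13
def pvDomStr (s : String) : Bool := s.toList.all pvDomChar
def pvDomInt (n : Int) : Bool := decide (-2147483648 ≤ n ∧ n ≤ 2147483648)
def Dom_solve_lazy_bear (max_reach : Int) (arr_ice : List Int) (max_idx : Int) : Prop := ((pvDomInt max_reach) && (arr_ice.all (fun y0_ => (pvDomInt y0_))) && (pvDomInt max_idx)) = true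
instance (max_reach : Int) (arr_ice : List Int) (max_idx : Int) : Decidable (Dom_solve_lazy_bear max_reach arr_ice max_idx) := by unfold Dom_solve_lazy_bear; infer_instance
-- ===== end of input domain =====

-- B replaces A's incremental add/subtract sliding-window loop by a prefix-sum table plus a max over
-- window differences P[l+2k+1]-P[l] (objective: alternative decomposition, same O(n) cost).

-- ===== PORT A =====
-- the while loop of A: one iteration per fuel unit (fuel = number of iterations, (max_idx - rp).toNat)
def lazyLoop (arr : List Int) (lp rp curr maxIce : Int) : Nat → Int
  | 0 => maxIce
  | n + 1 =>
    let lp' := lp + 1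
    let rp' := rp + 1
    let curr' := curr - PySem.List.pyGetD arr (lp' - 1) 0 + PySem.List.pyGetD arr rp' 0
    lazyLoop arr lp' rp' curr' (max maxIce curr') n

def solve_lazy_bear (max_reach : Int) (arr_ice : List Int) (max_idx : Int) : Int :=
  let lp : Int := 1
  let rp : Int := lp + max_reach * 2
  if rp ≥ max_idx then arr_ice.sum
  else
    let curr_ice := (PySem.List.slice arr_ice (some lp) (some (rp + 1))).sum
    lazyLoop arr_ice lp rp curr_ice curr_ice (max_idx - rp).toNat

-- ===== PORT B =====
-- P.append(P[-1] + x)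
def prefStep (P : List Int) (x : Int) : List Int := P ++ [PySem.List.pyGetD P (-1) 0 + x]

def solve_lazy_bear_alt (max_reach : Int) (arr_ice : List Int) (max_idx : Int) : Int :=
  if 1 + 2 * max_reach ≥ max_idx then arr_ice.sum
  else
    let P := arr_ice.foldl prefStep [0]
    let vals := (PySem.List.pyRange 1 (max_idx - 2 * max_reach + 1) 1).map
      (fun l => PySem.List.pyGetD P (l + 2 * max_reach + 1) 0 - PySem.List.pyGetD P l 0)
    (PySem.List.max? vals (fun y => y)).getD 0

-- ===== PRECONDITION & SPEC =====
-- Pre_ excludes inputs on which A's sliding loop runs with max_idx beyond the list (IndexError) and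
-- inputs with a negative max_reach that reach the loop, where A's empty-slice start and
-- negative-index wraparound values are accidents of its implementation (A may also raise there).
def Pre_solve_lazy_bear (max_reach : Int) (arr_ice : List Int) (max_idx : Int) : Prop :=
  1 + 2 * max_reach ≥ max_idx ∨ (0 ≤ max_reach ∧ max_idx < (arr_ice.length : Int))
instance (max_reach : Int) (arr_ice : List Int) (max_idx : Int) : Decidable (Pre_solve_lazy_bear max_reach arr_ice max_idx) := by unfold Pre_solve_lazy_bear; infer_instance

def pvWitness_solve_lazy_bear : Int × List Int × Int := (1, [1, 2, 3, 4, 5], 4)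

def Spec_solve_lazy_bear (max_reach : Int) (arr_ice : List Int) (max_idx : Int) (out : Int) : Prop := out = solve_lazy_bear_alt max_reach arr_ice max_idx
instance (max_reach : Int) (arr_ice : List Int) (max_idx : Int) (out : Int) : Decidable (Spec_solve_lazy_bear max_reach arr_ice max_idx out) := by unfold Spec_solve_lazy_bear; infer_instance

-- ===== CLAIM (what is proved, stated in full; the proofs are below) =====
def Claim_equal_solve_lazy_bear : Prop := ∀ (max_reach : Int) (arr_ice : List Int) (max_idx : Int), Dom_solve_lazy_bear max_reach arr_ice max_idx → Pre_solve_lazy_bear max_reach arr_ice max_idx → Spec_solve_lazy_bear max_reach arr_ice max_idx (solve_lazy_bear max_reach arr_ice max_idx)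

-- ===== LEMMAS AND PROOFS =====

-- prefix sum of the first i elements (i : Int, clamped)
def pvT (arr : List Int) (i : Int) : Int := (arr.take i.toNat).sum

lemma pvT_succ (arr : List Int) (i : Int) (h0 : 0 ≤ i) (h : i < (arr.length : Int)) :
    pvT arr (i + 1) = pvT arr i + PySem.List.pyGetD arr i 0 := by
  have hlt : i.toNat < arr.length := by omega
  have h1 : (i + 1).toNat = i.toNat + 1 := by omega
  rw [pvT, pvT, h1, List.sum_take_succ arr i.toNat hlt,
    PySem.List.pyGetD_eq_getElem arr 0 h0 (by omega)]

lemma pv_slice_sum (arr : List Int) (a k : Int) (h0 : 0 ≤ a) (hk : 0 ≤ k) :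
    ((arr.drop a.toNat).take k.toNat).sum = pvT arr (a + k) - pvT arr a := by
  have h1 : (a + k).toNat = a.toNat + k.toNat := by omega
  rw [pvT, pvT, h1, List.take_add, List.sum_append]
  ring

lemma loopA_spec (arr : List Int) (mr : Int) :
    ∀ (n : Nat) (l mx : Int), 1 ≤ l → 0 ≤ mr → l + 2 * mr + n < (arr.length : Int) →
    lazyLoop arr l (l + 2 * mr) (pvT arr (l + 2 * mr + 1) - pvT arr l) mx n
      = List.foldl max mx ((PySem.List.pyRange (l + 1) (l + 1 + n) 1).map
          (fun j => pvT arr (j + 2 * mr + 1) - pvT arr j)) := by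
  intro n
  induction n with
  | zero =>
    intro l mx _ _ _
    rw [PySem.List.pyRange_one_eq_nil (by omega)]
    simp [lazyLoop]
  | succ n ih =>
    intro l mx hl hmr hlen
    have hlen2 : l + 2 * mr + (n : Int) + 1 < (arr.length : Int) := by push_cast at hlen; omega
    simp only [lazyLoop]
    have hcurr : pvT arr (l + 2 * mr + 1) - pvT arr l
        - PySem.List.pyGetD arr (l + 1 - 1) 0 + PySem.List.pyGetD arr (l + 2 * mr + 1) 0
        = pvT arr ((l + 1) + 2 * mr + 1) - pvT arr (l + 1) := by
      have e1 : pvT arr (l + 1) = pvT arr l + PySem.List.pyGetD arr l 0 :=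
        pvT_succ arr l (by omega) (by omega)
      have e2 : pvT arr ((l + 2 * mr + 1) + 1) = pvT arr (l + 2 * mr + 1)
          + PySem.List.pyGetD arr (l + 2 * mr + 1) 0 :=
        pvT_succ arr (l + 2 * mr + 1) (by omega) (by omega)
      have e3 : (l + 1) + 2 * mr + 1 = (l + 2 * mr + 1) + 1 := by ring
      have e4 : l + 1 - 1 = l := by ring
      rw [e3, e2, e4, e1]; ring
    rw [hcurr]
    have erp : l + 2 * mr + 1 = (l + 1) + 2 * mr := by ring
    rw [erp]
    have ihh := ih (l + 1) (max mx (pvT arr ((l + 1) + 2 * mr + 1) - pvT arr (l + 1)))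
      (by omega) hmr (by omega)
    rw [ihh]
    rw [PySem.List.pyRange_one_cons (show l + 1 < l + 1 + ((n + 1 : Nat) : Int) by push_cast; omega)]
    simp only [List.map_cons, List.foldl_cons]
    have eb : l + 1 + ((n + 1 : Nat) : Int) = (l + 1) + 1 + (n : Int) := by push_cast; ring
    rw [eb]

lemma prefStep_append (acc : List Int) (s x : Int) :
    prefStep (acc ++ [s]) x = (acc ++ [s]) ++ [s + x] := by
  rw [prefStep, PySem.List.pyGetD_neg_one_append_singleton]

-- the exact prefix tail B's loop appends after the seed [0]
def pvPref : Int → List Int → List Int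
  | _, [] => []
  | s, x :: t => (s + x) :: pvPref (s + x) t

lemma fold_prefStep : ∀ (xs acc : List Int) (s : Int),
    xs.foldl prefStep (acc ++ [s]) = (acc ++ [s]) ++ pvPref s xs := by
  intro xs
  induction xs with
  | nil => intro acc s; simp [pvPref]
  | cons x t ih =>
    intro acc s
    rw [List.foldl_cons, prefStep_append]
    have := ih (acc ++ [s]) (s + x)
    rw [this]
    simp [pvPref]

lemma pvPref_length : ∀ (xs : List Int) (s : Int), (pvPref s xs).length = xs.length := by
  intro xs
  induction xs with
  | nil => intro s; rfl
  | cons x t ih => intro s; simp [pvPref, ih]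

lemma pvPref_getD : ∀ (xs : List Int) (s : Int) (i : Nat), i < xs.length →
    (pvPref s xs).getD i 0 = s + (xs.take (i + 1)).sum := by
  intro xs
  induction xs with
  | nil => intro s i h; simp at h
  | cons x t ih =>
    intro s i h
    cases i with
    | zero => simp [pvPref]
    | succ j =>
      simp only [pvPref, List.getD_cons_succ, List.take_succ_cons, List.sum_cons]
      rw [ih (s + x) j (by simpa using h)]
      ring

lemma P_length (arr : List Int) : (arr.foldl prefStep [0]).length = arr.length + 1 := by
  have e : ([] : List Int) ++ [0] = [0] := rfl
  rw [← e, fold_prefStep]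
  simp [pvPref_length]

lemma P_getD (arr : List Int) (i : Nat) (h : i ≤ arr.length) :
    (arr.foldl prefStep [0]).getD i 0 = pvT arr (i : Int) := by
  have e : ([] : List Int) ++ [0] = [0] := rfl
  rw [← e, fold_prefStep]
  cases i with
  | zero => simp [pvT]
  | succ j =>
    have hj : j < arr.length := by omega
    have e2 : (([] : List Int) ++ [0] ++ pvPref 0 arr).getD (j + 1) 0 = (pvPref 0 arr).getD j 0 := by
      simp
    rw [e2, pvPref_getD arr 0 j hj]
    simp [pvT]

lemma P_pyGetD (arr : List Int) (i : Int) (h0 : 0 ≤ i) (h : i ≤ (arr.length : Int)) :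
    PySem.List.pyGetD (arr.foldl prefStep [0]) i 0 = pvT arr i := by
  have hlt : i < ((arr.foldl prefStep [0]).length : Int) := by rw [P_length]; push_cast; omega
  rw [PySem.List.pyGetD_eq_getElem _ 0 h0 hlt]
  have hg := P_getD arr i.toNat (by omega)
  rw [List.getD_eq_getElem _ 0 (by rw [P_length]; omega)] at hg
  rw [hg]
  congr 1
  omega

-- ===== VERDICT (by name: the statement is the Claim_ definition above) =====
theorem solve_lazy_bear_spec : Claim_equal_solve_lazy_bear := by
  intro mr arr M _ hpre
  show solve_lazy_bear mr arr M = solve_lazy_bear_alt mr arr M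
  simp only [solve_lazy_bear, solve_lazy_bear_alt]
  by_cases hg : (1 : Int) + mr * 2 ≥ M
  · rw [if_pos (by omega : (1 : Int) + mr * 2 ≥ M), if_pos (by omega : (1 : Int) + 2 * mr ≥ M)]
  · rw [if_neg (by omega : ¬ ((1 : Int) + mr * 2 ≥ M)), if_neg (by omega : ¬ ((1 : Int) + 2 * mr ≥ M))]
    have hmr : 0 ≤ mr := by
      rcases hpre with h | ⟨h, _⟩
      · omega
      · exact h
    have hM : M < (arr.length : Int) := by
      rcases hpre with h | ⟨_, h⟩
      · omega
      · exact h
    -- A's initial window sum is a prefix difference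
    have hslice : (PySem.List.slice arr (some 1) (some (1 + mr * 2 + 1))).sum
        = pvT arr (1 + 2 * mr + 1) - pvT arr 1 := by
      rw [PySem.List.slice_toNat arr (by omega) (by omega)]
      have e : (1 + mr * 2 + 1).toNat - (1 : Int).toNat = (1 + 2 * mr).toNat := by omega
      rw [e, pv_slice_sum arr 1 (1 + 2 * mr) (by omega) (by omega)]
      have e2 : 1 + (1 + 2 * mr) = 1 + 2 * mr + 1 := by ring
      rw [e2]
    rw [hslice]
    have erp : (1 : Int) + mr * 2 = 1 + 2 * mr := by ring
    rw [erp]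
    rw [loopA_spec arr mr ((M - (1 + 2 * mr)).toNat) 1
        (pvT arr (1 + 2 * mr + 1) - pvT arr 1) (by omega) hmr (by omega)]
    -- B's side: peel the first window off the max
    rw [PySem.List.pyRange_one_cons (by omega : (1 : Int) < M - 2 * mr + 1)]
    simp only [List.map_cons]
    rw [PySem.List.max?_id_cons, Option.getD_some]
    have erange : 1 + 1 + (((M - (1 + 2 * mr)).toNat : Nat) : Int) = M - 2 * mr + 1 := by omega
    rw [erange]
    have hmap : ((PySem.List.pyRange (1 + 1) (M - 2 * mr + 1) 1).map
          (fun l => PySem.List.pyGetD (arr.foldl prefStep [0]) (l + 2 * mr + 1) 0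
            - PySem.List.pyGetD (arr.foldl prefStep [0]) l 0))
        = ((PySem.List.pyRange (1 + 1) (M - 2 * mr + 1) 1).map
          (fun j => pvT arr (j + 2 * mr + 1) - pvT arr j)) := by
      apply List.map_congr_left
      intro l hl
      rw [PySem.List.mem_pyRange_one] at hl
      rw [P_pyGetD arr (l + 2 * mr + 1) (by omega) (by omega),
        P_pyGetD arr l (by omega) (by omega)]
    rw [hmap]
    rw [P_pyGetD arr (1 + 2 * mr + 1) (by omega) (by omega),
      P_pyGetD arr 1 (by omega) (by omega)]
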